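-- pv_equiv track=rewrite | github.com/gwj0421/BaekJoon_and_Programmers | 프로그래머스/lv1/12930. 이상한 문자 만들기/이상한 문자 만들기.py | solution
-- ===== SOURCE A (Python) =====
-- def solution(s):
--     s=s.split(' ')
--     tlist=[]
--     for i in s:
--         temp=''
--         for index,value in enumerate(i):
--             if index%2==0:
--                 temp+=value.upper()
--             else:
--                 temp+=value.lower()
--         tlist.append(temp)
--     return ' '.join(tlist)
-- ===== SOURCE B (Python) =====
-- def solution(s):
--     # One pass over s with a word-relative position counter reset at each separator;
--     # no split and no per-word inner loop.
--     out = []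
--     k = 0
--     for ch in s:
--         if ch == ' ':
--             out.append(' ')
--             k = 0
--         else:
--             out.append(ch.upper() if k % 2 == 0 else ch.lower())
--             k += 1
--     return ''.join(out)
-- ===== Notes on version B (the rewrite author's own statement) =====
-- stated objective: simpler
-- what changed: Replaces the word-split plus nested per-word enumerate loop and final join with a single pass over the string keeping a word-relative counter that is reset at each separator.
import Mathlib
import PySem

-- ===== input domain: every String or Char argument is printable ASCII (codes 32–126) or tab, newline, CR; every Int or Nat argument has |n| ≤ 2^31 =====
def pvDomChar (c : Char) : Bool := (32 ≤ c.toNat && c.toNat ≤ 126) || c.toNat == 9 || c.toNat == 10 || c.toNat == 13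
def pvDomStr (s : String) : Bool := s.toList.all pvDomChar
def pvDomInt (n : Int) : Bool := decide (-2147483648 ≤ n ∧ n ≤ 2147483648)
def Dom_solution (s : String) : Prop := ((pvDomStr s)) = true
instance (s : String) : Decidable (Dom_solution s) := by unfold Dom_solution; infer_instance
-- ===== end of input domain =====

-- B replaces the word-split, nested per-word enumerate loop and final join by a single
-- pass with a word-relative counter reset at each separator (simpler decomposition, same cost).


-- ===== PORT A =====
-- split on the separator; for each word, enumerate-indexed upper/lower; then join.
-- (Ported at the List Char level: PySem.Str.* are thin wrappers over PySem.Chars.*.)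
def solution (s : String) : String :=
  let words := PySem.Chars.splitOn s.toList [' ']          -- s = s.split(' ')
  let tlist := words.foldl (fun tl w =>
    tl ++ [ (PySem.List.enumerate w 0).foldl (fun temp iv =>
        if PySem.Int.mod iv.1 2 = 0 then temp ++ PySem.Chars.upper [iv.2]
        else temp ++ PySem.Chars.lower [iv.2]) [] ]) []
  String.ofList (PySem.Chars.join [' '] tlist)             -- ' '.join(tlist)

-- ===== PORT B =====
-- single pass, counter k reset to 0 at a separator, otherwise upper/lower by parity of k.
def solution_alt (s : String) : String :=
  let st := s.toList.foldl (fun (p : List Char × Int) ch =>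
    if ch = ' ' then (p.1 ++ [' '], 0)
    else (p.1 ++ [if PySem.Int.mod p.2 2 = 0 then PySem.Chars.upperChar ch
                  else PySem.Chars.lowerChar ch], p.2 + 1)) ([], 0)
  String.ofList st.1                                       -- ''.join(out)

-- ===== PRECONDITION & SPEC =====
def Spec_solution (s : String) (out : String) : Prop := out = solution_alt s
instance (s : String) (out : String) : Decidable (Spec_solution s out) := by unfold Spec_solution; infer_instance

-- ===== CLAIM (what is proved, stated in full; the proofs are below) =====
def Claim_equal_solution : Prop := ∀ (s : String), Dom_solution s → Spec_solution s (solution s)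

-- ===== LEMMAS AND PROOFS =====

-- the cased character at word-relative index k
def caseChar (k : Int) (c : Char) : Char :=
  if PySem.Int.mod k 2 = 0 then PySem.Chars.upperChar c else PySem.Chars.lowerChar c

-- A's per-word transform, index-explicit
def wordmap : List Char → Int → List Char
  | [], _ => []
  | c :: rest, k => caseChar k c :: wordmap rest (k + 1)

-- the common spec: word-relative casing with reset on spaces
def wfun : List Char → Int → List Char
  | [], _ => []
  | c :: rest, k =>
      if c = ' ' then ' ' :: wfun rest 0 else caseChar k c :: wfun rest (k + 1)

-- split on ' ' without fuel (reversed current-word accumulator)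
def mySplitAux : List Char → List Char → List (List Char)
  | [], cur => [cur.reverse]
  | c :: rest, cur =>
      if c = ' ' then cur.reverse :: mySplitAux rest [] else mySplitAux rest (c :: cur)

lemma wordmap_append (a b : List Char) (k : Int) :
    wordmap (a ++ b) k = wordmap a k ++ wordmap b (k + a.length) := by
  induction a generalizing k with
  | nil => simp [wordmap]
  | cons c rest ih =>
      simp only [List.cons_append, wordmap, ih (k + 1), List.length_cons]
      have h : k + 1 + (rest.length : Int) = k + ((rest.length : Int) + 1) := by ring
      push_cast
      rw [h]

lemma enum_fold (w : List Char) (n : Int) (temp : List Char) :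
    (PySem.List.enumerate w n).foldl (fun temp iv =>
        if PySem.Int.mod iv.1 2 = 0 then temp ++ PySem.Chars.upper [iv.2]
        else temp ++ PySem.Chars.lower [iv.2]) temp = temp ++ wordmap w n := by
  induction w generalizing n temp with
  | nil => simp [PySem.List.enumerate, wordmap]
  | cons c rest ih =>
      rw [PySem.List.enumerate_cons]
      simp only [List.foldl_cons]
      by_cases h : PySem.Int.mod n 2 = 0
      · rw [if_pos h, ih]
        simp only [wordmap, caseChar, if_pos h, PySem.Chars.upper, List.map_cons,
          List.map_nil, List.append_assoc, List.cons_append, List.nil_append]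
      · rw [if_neg h, ih]
        simp only [wordmap, caseChar, if_neg h, PySem.Chars.lower, List.map_cons,
          List.map_nil, List.append_assoc, List.cons_append, List.nil_append]

lemma splitOn_go_eq (fuel : Nat) (l cur : List Char) (acc : List (List Char))
    (h : l.length ≤ fuel) :
    PySem.Chars.splitOn.go [' '] fuel l cur acc = acc.reverse ++ mySplitAux l cur := by
  induction fuel generalizing l cur acc with
  | zero =>
      have : l = [] := List.eq_nil_of_length_eq_zero (Nat.le_zero.mp h)
      subst this; simp [PySem.Chars.splitOn.go, mySplitAux]
  | succ fuel ih =>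
      cases l with
      | nil =>
          have hstep : PySem.Chars.splitOn.go [' '] (fuel + 1) [] cur acc =
              (cur.reverse :: acc).reverse := rfl
          rw [hstep]
          simp [mySplitAux]
      | cons c rest =>
          have hstep : PySem.Chars.splitOn.go [' '] (fuel + 1) (c :: rest) cur acc =
              (if [' '].isPrefixOf (c :: rest) = true then
                PySem.Chars.splitOn.go [' '] fuel rest [] (cur.reverse :: acc)
              else PySem.Chars.splitOn.go [' '] fuel rest (c :: cur) acc) := rfl
          rw [hstep]
          have hlen : rest.length ≤ fuel := by simpa using Nat.le_of_succ_le_succ h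
          by_cases hc : c = ' '
          · subst hc
            have hp : ([' '].isPrefixOf (' ' :: rest)) = true := by simp [List.isPrefixOf]
            rw [if_pos hp, ih _ _ _ hlen]
            simp [mySplitAux]
          · have hp : ¬ (([' '].isPrefixOf (c :: rest)) = true) := by
              simp only [List.isPrefixOf, Bool.and_true,
                beq_iff_eq]
              exact fun e => hc e.symm
            rw [if_neg hp, ih _ _ _ hlen]
            simp [mySplitAux, hc]

lemma intercalate_cons_ne_nil (sep a : List Char) (l : List (List Char)) (h : l ≠ []) :
    List.intercalate sep (a :: l) = a ++ sep ++ List.intercalate sep l := by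
  cases l with
  | nil => exact absurd rfl h
  | cons b l => simp [List.intercalate, List.intersperse]

lemma mySplitAux_ne_nil (l cur : List Char) : mySplitAux l cur ≠ [] := by
  induction l generalizing cur with
  | nil => simp [mySplitAux]
  | cons c rest ih =>
      simp only [mySplitAux]
      split
      · simp
      · exact ih _

lemma join_map_mySplitAux (cs cur : List Char) :
    PySem.Chars.join [' '] ((mySplitAux cs cur).map (fun w => wordmap w 0)) =
      wordmap cur.reverse 0 ++ wfun cs cur.length := by
  induction cs generalizing cur with
  | nil => simp [mySplitAux, wfun, PySem.Chars.join, List.intercalate]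
  | cons c rest ih =>
      simp only [mySplitAux, wfun]
      by_cases hc : c = ' '
      · subst hc
        simp only [if_true, List.map_cons, PySem.Chars.join]
        rw [intercalate_cons_ne_nil _ _ _ (by simp [mySplitAux_ne_nil])]
        have := ih []
        simp only [PySem.Chars.join, List.reverse_nil, wordmap, List.length_nil] at this
        rw [this]
        simp
      · simp only [if_neg hc]
        rw [ih (c :: cur)]
        simp only [List.reverse_cons, wordmap_append, wordmap,
          List.length_reverse, List.length_cons]
        simp only [List.append_assoc, List.nil_append, List.cons_append]
        push_cast
        ring_nf

lemma bfold (cs : List Char) (acc : List Char) (k : Int) :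
    (cs.foldl (fun (p : List Char × Int) ch =>
      if ch = ' ' then (p.1 ++ [' '], 0)
      else (p.1 ++ [if PySem.Int.mod p.2 2 = 0 then PySem.Chars.upperChar ch
                    else PySem.Chars.lowerChar ch], p.2 + 1)) (acc, k)).1
    = acc ++ wfun cs k := by
  induction cs generalizing acc k with
  | nil => simp [wfun]
  | cons c rest ih =>
      simp only [List.foldl_cons]
      by_cases hc : c = ' '
      · subst hc
        rw [if_pos rfl, ih]
        simp [wfun]
      · rw [if_neg hc, ih]
        simp [wfun, hc, caseChar]

-- ===== VERDICT (by name: the statement is the Claim_ definition above) =====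
theorem solution_spec : Claim_equal_solution := by
  intro s _
  simp only [Spec_solution, solution, solution_alt]
  rw [PySem.List.foldl_append_singleton_eq_map]
  have hsplit : PySem.Chars.splitOn s.toList [' '] = mySplitAux s.toList [] := by
    unfold PySem.Chars.splitOn
    rw [splitOn_go_eq _ _ _ _ (by omega)]
    simp
  rw [hsplit, bfold]
  have hmap : (mySplitAux s.toList []).map (fun w =>
      (PySem.List.enumerate w 0).foldl (fun temp iv =>
        if PySem.Int.mod iv.1 2 = 0 then temp ++ PySem.Chars.upper [iv.2]
        else temp ++ PySem.Chars.lower [iv.2]) []) =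
      (mySplitAux s.toList []).map (fun w => wordmap w 0) := by
    apply List.map_congr_left
    intro w _
    rw [enum_fold]
    simp
  rw [List.nil_append, hmap, join_map_mySplitAux]
  simp [wordmap]
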